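-- pv_equiv track=rewrite | github.com/morcb13-bit/Paper | 2026-03-07-cone‐FFT/Parseval core.py | build_fractal_integer_signal_inv
-- ===== SOURCE A (Python) =====
-- def step_rule_40_inv(T: list[int], U: list[int]) -> tuple[list[int], list[int]]:
--     """
--     1段整数逆再帰。Proposition C より厳密に整数。
--         T_prev = (6T + 2U) / 40
--         U_prev = (2T - 6U) / 40
--     """
--     T_prev = [(6*t + 2*u) // 40 for t, u in zip(T, U)]
--     U_prev = [(2*t - 6*u) // 40 for t, u in zip(T, U)]
--     return T_prev, U_prev
--
-- def build_fractal_integer_signal_inv(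
--     B: int,
--     T: list[int],
--     U: list[int],
-- ) -> tuple[list[int], list[int]]:
--     """
--     B段の整数逆再帰。build_fractal_integer_signal の完全逆写像。
--     Proposition C より整数上で閉じる。
--     """
--     for _ in range(B):
--         T, U = step_rule_40_inv(T, U)
--     return T, U
-- ===== SOURCE B (Python) =====
-- def _step_pair(t: int, u: int) -> tuple[int, int]:
--     return ((6 * t + 2 * u) // 40, (2 * t - 6 * u) // 40)
--
--
-- def _iter_pair(t: int, u: int, B: int) -> tuple[int, int]:
--     """Apply _step_pair B times, jumping over the cycle once the state repeats."""
--     state = (t, u)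
--     seen = {}
--     step = 0
--     while step < B:
--         if state in seen:
--             p = seen[state]
--             rem = (B - p) % (step - p)
--             for _ in range(rem):
--                 state = _step_pair(*state)
--             return state
--         seen[state] = step
--         state = _step_pair(*state)
--         step += 1
--     return state
--
--
-- def build_fractal_integer_signal_inv(B: int, T: list[int], U: list[int]) -> tuple[list[int], list[int]]:
--     if B <= 0:
--         return T, U
--     pairs = [_iter_pair(t, u, B) for t, u in zip(T, U)]
--     return [p[0] for p in pairs], [p[1] for p in pairs]
-- ===== Notes on version B (the rewrite author's own statement) =====
-- stated objective: faster
-- what changed: Instead of mapping the contraction step over the whole lists B times, B iterates each (t,u) pair independently with a seen-states dictionary, detects the cycle the contraction quickly falls into, and jumps the remaining iterations via (B-p) % period.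
import Mathlib
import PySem

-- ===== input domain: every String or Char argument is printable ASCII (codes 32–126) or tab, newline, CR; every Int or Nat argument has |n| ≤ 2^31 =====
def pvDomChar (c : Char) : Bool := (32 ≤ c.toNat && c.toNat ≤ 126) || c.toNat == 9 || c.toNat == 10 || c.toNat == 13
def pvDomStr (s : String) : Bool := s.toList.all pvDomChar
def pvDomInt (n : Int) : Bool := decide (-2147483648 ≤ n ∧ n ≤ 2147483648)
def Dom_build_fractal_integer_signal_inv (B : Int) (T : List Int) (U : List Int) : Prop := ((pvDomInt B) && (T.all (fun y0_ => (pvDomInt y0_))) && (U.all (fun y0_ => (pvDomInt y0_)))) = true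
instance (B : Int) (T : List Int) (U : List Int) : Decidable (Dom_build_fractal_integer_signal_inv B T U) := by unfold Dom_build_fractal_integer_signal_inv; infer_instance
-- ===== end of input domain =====

-- B replaces A's "apply the list-wide contraction step B times" by per-pair iteration with
-- cycle detection and a modular jump over the detected period (measured asymptotically faster for large B).

-- ===== PORT A =====
def step_rule_40_inv (T U : List Int) : List Int × List Int :=
  let T_prev := (T.zip U).map (fun p => PySem.Int.floordiv (6 * p.1 + 2 * p.2) 40)
  let U_prev := (T.zip U).map (fun p => PySem.Int.floordiv (2 * p.1 - 6 * p.2) 40)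
  (T_prev, U_prev)

def build_fractal_integer_signal_inv (B : Int) (T : List Int) (U : List Int) : List Int × List Int :=
  (PySem.List.pyRange 0 B 1).foldl (fun s _ => step_rule_40_inv s.1 s.2) (T, U)

-- ===== PORT B =====
def pvStepPair (p : Int × Int) : Int × Int :=
  (PySem.Int.floordiv (6 * p.1 + 2 * p.2) 40, PySem.Int.floordiv (2 * p.1 - 6 * p.2) 40)

-- the `while step < B` loop of _iter_pair; fuel = B - step
def pvIterLoop (Bn : Nat) : Nat → Nat → (Int × Int) → PySem.Dict (Int × Int) Nat → Int × Int
  | 0, _, state, _ => state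
  | fuel + 1, step, state, seen =>
    match seen.get? state with
    | some p => pvStepPair^[(Bn - p) % (step - p)] state
    | none => pvIterLoop Bn fuel (step + 1) (pvStepPair state) (seen.insert state step)

def pvIterPair (t u : Int) (Bn : Nat) : Int × Int :=
  pvIterLoop Bn Bn 0 (t, u) PySem.Dict.empty

def build_fractal_integer_signal_inv_alt (B : Int) (T : List Int) (U : List Int) : List Int × List Int :=
  if B ≤ 0 then (T, U)
  else
    let pairs := (T.zip U).map (fun p => pvIterPair p.1 p.2 B.toNat)
    (pairs.map (·.1), pairs.map (·.2))

-- ===== PRECONDITION & SPEC =====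
def Spec_build_fractal_integer_signal_inv (B : Int) (T : List Int) (U : List Int) (out : List Int × List Int) : Prop := out = build_fractal_integer_signal_inv_alt B T U
instance (B : Int) (T : List Int) (U : List Int) (out : List Int × List Int) : Decidable (Spec_build_fractal_integer_signal_inv B T U out) := by unfold Spec_build_fractal_integer_signal_inv; infer_instance

-- ===== CLAIM (what is proved, stated in full; the proofs are below) =====
def Claim_equal_build_fractal_integer_signal_inv : Prop := ∀ (B : Int) (T : List Int) (U : List Int), Dom_build_fractal_integer_signal_inv B T U → Spec_build_fractal_integer_signal_inv B T U (build_fractal_integer_signal_inv B T U)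

-- ===== LEMMAS AND PROOFS =====

-- A's `for _ in range(B)` fold ignores the loop variable: it is iteration `l.length` times.
theorem pv_foldl_const_iterate {σ : Type} (g : σ → σ) (l : List Int) (init : σ) :
    l.foldl (fun s _ => g s) init = g^[l.length] init := by
  induction l generalizing init with
  | nil => rfl
  | cons x xs ih => simp [List.foldl, ih, Function.iterate_succ_apply]

-- the while-loop computes pvStepPair^[Bn] of the start state
theorem pvIterLoop_spec (s0 : Int × Int) (Bn : Nat) :
    ∀ (fuel step : Nat) (state : Int × Int) (seen : PySem.Dict (Int × Int) Nat),
    state = pvStepPair^[step] s0 → step + fuel = Bn →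
    (∀ k v, seen.get? k = some v → v < step ∧ pvStepPair^[v] s0 = k) →
    pvIterLoop Bn fuel step state seen = pvStepPair^[Bn] s0 := by
  intro fuel
  induction fuel with
  | zero =>
    intro step state seen hstate hfuel _
    have hs : step = Bn := by omega
    simp only [pvIterLoop]
    rw [hstate, hs]
  | succ fuel ih =>
    intro step state seen hstate hfuel hinv
    simp only [pvIterLoop]
    cases hget : seen.get? state with
    | some p =>
      obtain ⟨hlt, hiter⟩ := hinv state p hget
      -- f^[p] s0 = state = f^[step] s0 : periodic point of period step - p
      have hper : Function.IsPeriodicPt pvStepPair (step - p) (pvStepPair^[p] s0) := by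
        unfold Function.IsPeriodicPt Function.IsFixedPt
        rw [← Function.iterate_add_apply]
        have : step - p + p = step := by omega
        rw [this, ← hstate, hiter]
      have hBp : (Bn - p) + p = Bn := by omega
      calc pvStepPair^[(Bn - p) % (step - p)] state
          = pvStepPair^[(Bn - p) % (step - p)] (pvStepPair^[p] s0) := by rw [hiter]
        _ = pvStepPair^[Bn - p] (pvStepPair^[p] s0) := hper.iterate_mod_apply (Bn - p)
        _ = pvStepPair^[Bn] s0 := by rw [← Function.iterate_add_apply, hBp]
    | none =>
      apply ih (step + 1) (pvStepPair state) (seen.insert state step)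
      · rw [hstate]
        exact (Function.iterate_succ_apply' pvStepPair step s0).symm
      · omega
      · intro k v hkv
        rw [PySem.Dict.get?_insert] at hkv
        by_cases hk : k = state
        · simp [hk] at hkv
          subst hkv
          exact ⟨by omega, by rw [← hstate, hk]⟩
        · simp [hk] at hkv
          obtain ⟨h1, h2⟩ := hinv k v hkv
          exact ⟨by omega, h2⟩

theorem pvIterPair_spec (t u : Int) (Bn : Nat) :
    pvIterPair t u Bn = pvStepPair^[Bn] (t, u) := by
  apply pvIterLoop_spec (t, u) Bn Bn 0 (t, u) PySem.Dict.empty rfl (by omega)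
  intro k v hkv
  simp [PySem.Dict.get?_empty] at hkv

-- one A-step on component lists of P.map g equals mapping pvStepPair once more
theorem pv_step_on_maps (Q : List (Int × Int)) :
    step_rule_40_inv (Q.map (·.1)) (Q.map (·.2)) =
      ((Q.map pvStepPair).map (·.1), (Q.map pvStepPair).map (·.2)) := by
  have hz : (Q.map (·.1)).zip (Q.map (·.2)) = Q := by
    rw [List.zip_map']
    simp
  simp only [step_rule_40_inv, hz, List.map_map]
  rfl

-- A's iteration, one or more steps, is the per-pair iteration of pvStepPair over zip T U
theorem pv_iterate_step (T U : List Int) (n : Nat) :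
    (fun s : List Int × List Int => step_rule_40_inv s.1 s.2)^[n + 1] (T, U) =
      (((T.zip U).map pvStepPair^[n + 1]).map (·.1),
       ((T.zip U).map pvStepPair^[n + 1]).map (·.2)) := by
  induction n with
  | zero =>
    simp only [List.map_map]
    rfl
  | succ n ih =>
    rw [Function.iterate_succ_apply', ih]
    have h := pv_step_on_maps ((T.zip U).map pvStepPair^[n + 1])
    simp only [List.map_map] at h ⊢
    rw [show pvStepPair^[n + 1 + 1] = pvStepPair ∘ pvStepPair^[n + 1] from
      Function.iterate_succ' pvStepPair (n + 1)]
    exact h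

-- ===== VERDICT (by name: the statement is the Claim_ definition above) =====
theorem build_fractal_integer_signal_inv_spec : Claim_equal_build_fractal_integer_signal_inv := by
  intro B T U _
  unfold Spec_build_fractal_integer_signal_inv
  unfold build_fractal_integer_signal_inv build_fractal_integer_signal_inv_alt
  by_cases hB : B ≤ 0
  · rw [PySem.List.pyRange_one_eq_nil (by omega)]
    simp [hB]
  · simp only [if_neg hB]
    rw [pv_foldl_const_iterate, PySem.List.length_pyRange_one]
    have hBt : (B - 0).toNat = B.toNat := by norm_num
    obtain ⟨n, hn⟩ : ∃ n, B.toNat = n + 1 := ⟨B.toNat - 1, by omega⟩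
    rw [hBt, hn, pv_iterate_step]
    have hpairs : (T.zip U).map (fun p => pvIterPair p.1 p.2 (n + 1))
        = (T.zip U).map pvStepPair^[n + 1] := by
      apply List.map_congr_left
      intro p _
      rw [pvIterPair_spec]
    simp only [hpairs]
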